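-- pv_equiv track=rewrite | github.com/jk-jung/problem-solving | codewars/6kyu/6_Subsequences with no adjacent items.py | no_adjacent_subsequences
-- ===== SOURCE A (Python) =====
-- def no_adjacent_subsequences(v):
--     r = []
--     def f(i=-2, t = []):
--         r.append(t)
--         i += 2
--         while i < len(v):
--             f(i, t + [v[i]])
--             i += 1
--     f()
--     return sorted(r)
-- ===== SOURCE B (Python) =====
-- def no_adjacent_subsequences(v):
--     # take/skip recursion over the suffix: either drop the head, or take it and skip the next
--     def f(rest):
--         if not rest:
--             return [[]]
--         return f(rest[1:]) + [[rest[0]] + s for s in f(rest[2:])]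
--     return sorted(f(v))
-- ===== Notes on version B (the rewrite author's own statement) =====
-- stated objective: alternative
-- what changed: Replaces A's n-ary accumulator recursion (append current prefix to a mutated result list, then loop over every valid next start position) with a pure binary take/skip recursion on the suffix: skip the head, or take it and skip its neighbour, with the singleton empty subsequence as base case, then sort.
import Mathlib
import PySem

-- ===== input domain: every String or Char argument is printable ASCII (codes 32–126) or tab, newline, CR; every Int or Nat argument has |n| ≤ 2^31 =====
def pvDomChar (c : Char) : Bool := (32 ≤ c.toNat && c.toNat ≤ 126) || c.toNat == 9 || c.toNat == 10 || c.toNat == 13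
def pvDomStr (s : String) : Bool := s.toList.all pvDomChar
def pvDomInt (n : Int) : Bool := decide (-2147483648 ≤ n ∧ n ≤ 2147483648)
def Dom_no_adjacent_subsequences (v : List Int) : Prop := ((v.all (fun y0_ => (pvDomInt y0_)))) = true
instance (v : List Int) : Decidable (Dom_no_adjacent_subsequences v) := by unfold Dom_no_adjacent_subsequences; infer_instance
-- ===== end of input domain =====

-- B is an alternative decomposition: a pure binary take/skip recursion instead of A's
-- accumulator recursion that loops over every valid next start position.
-- ===== PORT A =====
-- A's inner f(i, t): append t to r, then for each later index j ≥ i+2 recurse with t+[v[j]].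
-- The integer index i is rendered by the corresponding suffix of v (v[i] = head of the suffix,
-- next start i+2 = drop 1 of its tail); same recursion tree, same order of appends to r.
mutual
def pvA_f (rest : List Int) (t : List Int) : List (List Int) :=
  t :: pvA_loop rest t
  termination_by (rest.length, 1)
  decreasing_by exact Prod.Lex.right _ (by omega)
def pvA_loop : List Int → List Int → List (List Int)
  | [], _ => []
  | x :: rest', t => pvA_f (rest'.drop 1) (t ++ [x]) ++ pvA_loop rest' t
  termination_by rest _ => (rest.length, 0)
  decreasing_by all_goals exact Prod.Lex.left _ _ (by simp; try omega)
end

def no_adjacent_subsequences (v : List Int) : List (List Int) :=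
  PySem.List.sorted (pvA_f v []) (fun x => x) false

-- ===== PORT B =====
def pvB_f : List Int → List (List Int)
  | [] => [[]]
  | x :: rest => pvB_f rest ++ (pvB_f (rest.drop 1)).map (fun s => x :: s)
  termination_by rest => rest.length
  decreasing_by all_goals (simp; try omega)

def no_adjacent_subsequences_alt (v : List Int) : List (List Int) :=
  PySem.List.sorted (pvB_f v) (fun x => x) false

-- ===== PRECONDITION & SPEC =====
def Spec_no_adjacent_subsequences (v : List Int) (out : List (List Int)) : Prop := out = no_adjacent_subsequences_alt v
instance (v : List Int) (out : List (List Int)) : Decidable (Spec_no_adjacent_subsequences v out) := by unfold Spec_no_adjacent_subsequences; infer_instance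

-- ===== CLAIM =====
def Claim_equal_no_adjacent_subsequences : Prop := ∀ (v : List Int), Dom_no_adjacent_subsequences v → Spec_no_adjacent_subsequences v (no_adjacent_subsequences v)

-- ===== LEMMAS AND PROOFS =====
-- The two enumerations are permutations of each other: A's f(rest, t) lists exactly
-- t ++ s for every non-adjacent subsequence s of rest, which is what B's f lists.
theorem pvA_perm_pvB (n : Nat) : ∀ (rest t : List Int), rest.length ≤ n →
    (pvA_f rest t).Perm ((pvB_f rest).map (fun s => t ++ s)) := by
  induction n with
  | zero =>
    intro rest t h
    have hr : rest = [] := by cases rest <;> simp_all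
    subst hr
    simp [pvA_f, pvA_loop, pvB_f]
  | succ n ih =>
    intro rest t h
    cases rest with
    | nil => simp [pvA_f, pvA_loop, pvB_f]
    | cons x rest' =>
      have h1 : rest'.length ≤ n := by simp at h; omega
      have h2 : (rest'.drop 1).length ≤ n := by simp at h ⊢; omega
      have IH1 := ih rest' t h1
      have IH2 := ih (rest'.drop 1) (t ++ [x]) h2
      have hA : pvA_f (x :: rest') t
          = t :: (pvA_f (rest'.drop 1) (t ++ [x]) ++ pvA_loop rest' t) := by
        simp only [pvA_f, pvA_loop]
      have hB : (pvB_f (x :: rest')).map (fun s => t ++ s)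
          = (pvB_f rest').map (fun s => t ++ s)
            ++ (pvB_f (rest'.drop 1)).map (fun s => (t ++ [x]) ++ s) := by
        simp only [pvB_f]
        simp [List.map_append, Function.comp]
      rw [hA, hB]
      have hf : pvA_f rest' t = t :: pvA_loop rest' t := by simp only [pvA_f]
      have step1 : (t :: (pvA_f (rest'.drop 1) (t ++ [x]) ++ pvA_loop rest' t)).Perm
          (pvA_f (rest'.drop 1) (t ++ [x]) ++ (t :: pvA_loop rest' t)) :=
        List.perm_middle.symm
      have step2 : (pvA_f (rest'.drop 1) (t ++ [x]) ++ (t :: pvA_loop rest' t)).Perm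
          ((pvB_f (rest'.drop 1)).map (fun s => (t ++ [x]) ++ s)
            ++ (pvB_f rest').map (fun s => t ++ s)) :=
        List.Perm.append IH2 (hf ▸ IH1)
      exact step1.trans (step2.trans List.perm_append_comm)

-- ===== VERDICT =====
theorem no_adjacent_subsequences_spec : Claim_equal_no_adjacent_subsequences := by
  intro v _
  unfold Spec_no_adjacent_subsequences no_adjacent_subsequences no_adjacent_subsequences_alt
  have hperm : (pvA_f v []).Perm (pvB_f v) := by
    have h := pvA_perm_pvB v.length v [] le_rfl
    simpa using h
  have hinst : (fun (a b : List Int) => a.decidableLT b)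
      = (LinearOrder.toDecidableLT : DecidableLT (List Int)) := Subsingleton.elim _ _
  rw [show (fun a b => List.decidableLT a b : DecidableLT (List Int)) = _ from hinst]
  exact PySem.List.sorted_eq_sorted_of_perm _ _ _ (fun a b hab => hab) hperm
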